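-- pv_equiv track=rewrite | github.com/yonsweng/ps | boj/boj_23879.py | min_cmds
-- ===== SOURCE A (Python) =====
-- def min_cmds(s):
--     if len(s) == 1:
--         return abs(s[0])
--
--     result = 0
--
--     if all(x > 0 for x in s):
--         result += min(s)
--         s = [x - min(s) for x in s]
--     if all(x < 0 for x in s):
--         result += -max(s)
--         s = [x - max(s) for x in s]
--
--     r = [s[0]]
--     for si in s[1:]:
--         if r[-1] * si <= 0:
--             result += min_cmds(r)
--             r = [si]
--         else:
--             r.append(si)
--     result += min_cmds(r)
--
--     return result
-- ===== SOURCE B (Python) =====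
-- def min_cmds(s):
--     res = 0
--     prev = 0
--     for x in s:
--         if prev * x <= 0:
--             res += abs(x)
--         else:
--             res += max(0, abs(x) - abs(prev))
--         prev = x
--     return res
-- ===== Notes on version B (the rewrite author's own statement) =====
-- stated objective: faster
-- what changed: Replaced A's recursive segment-splitting with repeated min/max subtraction (quadratic) by a single linear pass that adds, per element, |x| at a sign boundary (prev*x <= 0) and max(0,|x|-|prev|) inside a same-sign run.
import Mathlib
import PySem

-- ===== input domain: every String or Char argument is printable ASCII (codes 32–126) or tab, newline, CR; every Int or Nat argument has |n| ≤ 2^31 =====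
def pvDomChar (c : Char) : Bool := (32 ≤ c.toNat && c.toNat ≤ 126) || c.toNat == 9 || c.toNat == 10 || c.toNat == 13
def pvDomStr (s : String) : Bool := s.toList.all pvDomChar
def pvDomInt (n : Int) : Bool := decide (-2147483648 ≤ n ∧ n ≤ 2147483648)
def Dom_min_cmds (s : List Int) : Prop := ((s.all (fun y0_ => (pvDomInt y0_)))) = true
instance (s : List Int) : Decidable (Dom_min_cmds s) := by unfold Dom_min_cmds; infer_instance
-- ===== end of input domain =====

-- B replaces A's recursive sign-segment splitting (repeated min/max subtraction, O(n^2)) by one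
-- linear pass over adjacent pairs; proved equal on all nonempty lists (A raises ValueError on []).


-- ===== PORT A =====
-- Fuel-based transliteration of A's recursion; fuel = length of the list suffices because every
-- recursive call is on a strictly shorter segment (the fuel guard only makes the recursion total).
def goA : Nat → List Int → Int
  | 0, _ => 0
  | fuel+1, s =>
    if s.length = 1 then |s.headD 0| else
    let result : Int := 0
    let p : Int × List Int :=
      if s.all (fun x => decide (0 < x)) then
        (result + ((PySem.List.min? s (fun x => x)).getD 0),
         s.map (fun x => x - (PySem.List.min? s (fun x => x)).getD 0))
      else (result, s)
    let q : Int × List Int :=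
      if p.2.all (fun x => decide (x < 0)) then
        (p.1 + -((PySem.List.max? p.2 (fun x => x)).getD 0),
         p.2.map (fun x => x - (PySem.List.max? p.2 (fun x => x)).getD 0))
      else p
    let st := (q.2.drop 1).foldl
      (fun (st : Int × List Int) si =>
        if st.2.getLastD 0 * si ≤ 0 then (st.1 + goA fuel st.2, [si])
        else (st.1, st.2 ++ [si]))
      (q.1, [q.2.headD 0])
    st.1 + goA fuel st.2

def min_cmds (s : List Int) : Int := goA s.length s

-- ===== PORT B =====
def min_cmds_alt (s : List Int) : Int :=
  (s.foldl
    (fun (st : Int × Int) x =>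
      (st.1 + (if st.2 * x ≤ 0 then |x| else max 0 (|x| - |st.2|)), x))
    (0, 0)).1

-- ===== PRECONDITION & SPEC =====
-- Pre_ excludes only the empty list, on which Python A raises ValueError (min of empty sequence).
def Pre_min_cmds (s : List Int) : Prop := s ≠ []
instance (s : List Int) : Decidable (Pre_min_cmds s) := by unfold Pre_min_cmds; infer_instance
def pvWitness_min_cmds : List Int := [1, -2, 3]

def Spec_min_cmds (s : List Int) (out : Int) : Prop := out = min_cmds_alt s
instance (s : List Int) (out : Int) : Decidable (Spec_min_cmds s out) := by unfold Spec_min_cmds; infer_instance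

-- ===== CLAIM (what is proved, stated in full; the proofs are below) =====
def Claim_equal_min_cmds : Prop := ∀ (s : List Int), Dom_min_cmds s → Pre_min_cmds s → Spec_min_cmds s (min_cmds s)

-- ===== LEMMAS AND PROOFS =====

-- per-step cost of B's pass, and B's pass as a structural recursion
def pvC (a b : Int) : Int := if a * b ≤ 0 then |b| else max 0 (|b| - |a|)
def pvF (a : Int) : List Int → Int
  | [] => 0
  | x :: t => pvC a x + pvF x t

-- same pass on nonnegative data: uniform max-of-difference form
def pvG (a : Int) : List Int → Int
  | [] => 0
  | x :: t => max 0 (x - a) + pvG x t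

-- "the chain a :: t contains an adjacent pair with nonpositive product" (a split point of A's loop)
def pvSp (a : Int) : List Int → Prop
  | [] => False
  | x :: t => a * x ≤ 0 ∨ pvSp x t

lemma foldl_pvF (t : List Int) : ∀ (res prev : Int),
    (t.foldl (fun (st : Int × Int) x =>
      (st.1 + (if st.2 * x ≤ 0 then |x| else max 0 (|x| - |st.2|)), x)) (res, prev)).1
    = res + pvF prev t := by
  induction t with
  | nil => intro res prev; simp [pvF]
  | cons x t ih =>
    intro res prev
    simp only [List.foldl_cons, ih, pvF, pvC]
    ring

lemma alt_eq_pvF (s : List Int) : min_cmds_alt s = pvF 0 s := by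
  unfold min_cmds_alt
  rw [foldl_pvF]
  ring

lemma pvF_nonneg_eq_pvG (t : List Int) : ∀ a : Int, 0 ≤ a → (∀ x ∈ t, 0 ≤ x) → pvF a t = pvG a t := by
  induction t with
  | nil => intro a _ _; rfl
  | cons x t ih =>
    intro a ha hall
    have hx : 0 ≤ x := hall x (by simp)
    have hrec := ih x hx (fun y hy => hall y (by simp [hy]))
    simp only [pvF, pvG, hrec, pvC]
    split_ifs with h
    · have hax : a * x = 0 := le_antisymm h (mul_nonneg ha hx)
      rcases mul_eq_zero.mp hax with h0 | h0 <;>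
        simp [h0, abs_of_nonneg hx] <;> omega
    · have hpos : 0 < a * x := lt_of_not_ge h
      have ha' : 0 < a := by nlinarith
      have hx' : 0 < x := by nlinarith
      rw [abs_of_nonneg hx, abs_of_nonneg ha]

lemma pvG_shift (t : List Int) : ∀ a m : Int, pvG (a - m) (t.map (fun x => x - m)) = pvG a t := by
  induction t with
  | nil => intro a m; rfl
  | cons x t ih =>
    intro a m
    simp only [List.map_cons, pvG]
    have : x - m - (a - m) = x - a := by ring
    rw [this, ih]

lemma pvF_reset (b x : Int) (t : List Int) (h : b * x ≤ 0) : pvF b (x :: t) = pvF 0 (x :: t) := by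
  have h0 : (0 : Int) * x ≤ 0 := by simp
  simp [pvF, pvC, h]

lemma pvF_append (xs : List Int) : ∀ (a : Int) (ys : List Int),
    pvF a (xs ++ ys) = pvF a xs + pvF (xs.getLastD a) ys := by
  induction xs with
  | nil => intro a ys; simp [pvF]
  | cons x xs ih =>
    intro a ys
    simp only [List.cons_append, pvF, ih, List.getLastD_cons]
    ring

lemma pvF_neg (t : List Int) : ∀ a : Int, pvF a t = pvF (-a) (t.map (fun x => -x)) := by
  induction t with
  | nil => intro a; rfl
  | cons x t ih =>
    intro a
    simp only [List.map_cons, pvF, ← ih]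
    have hc : pvC a x = pvC (-a) (-x) := by
      unfold pvC
      rw [neg_mul_neg, abs_neg, abs_neg]
    rw [hc]

lemma pvF_pos_shift (s : List Int) (m : Int) (hne : s ≠ []) (hm : 0 < m)
    (hall : ∀ x ∈ s, m ≤ x) : pvF 0 s = m + pvF 0 (s.map (fun x => x - m)) := by
  obtain ⟨h, t, rfl⟩ := List.exists_cons_of_ne_nil hne
  have hh : m ≤ h := hall h (by simp)
  have hhpos : 0 < h := lt_of_lt_of_le hm hh
  have ht : ∀ x ∈ t, m ≤ x := fun x hx => hall x (by simp [hx])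
  simp only [List.map_cons, pvF]
  have c1 : pvC 0 h = h := by
    unfold pvC; rw [if_pos (by simp), abs_of_nonneg hhpos.le]
  have c2 : pvC 0 (h - m) = h - m := by
    unfold pvC; rw [if_pos (by simp), abs_of_nonneg (by omega)]
  rw [c1, c2]
  rw [pvF_nonneg_eq_pvG t h hhpos.le (fun x hx => le_trans hm.le (ht x hx))]
  rw [pvF_nonneg_eq_pvG (t.map (fun x => x - m)) (h - m) (by omega)
    (by intro y hy; obtain ⟨x, hx, rfl⟩ := List.mem_map.mp hy; have := ht x hx; omega)]
  rw [pvG_shift t h m]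
  ring

lemma pvF_neg_shift (s : List Int) (M : Int) (hne : s ≠ []) (hM : M < 0)
    (hall : ∀ x ∈ s, x ≤ M) : pvF 0 s = -M + pvF 0 (s.map (fun x => x - M)) := by
  have e1 : pvF 0 s = pvF 0 (s.map (fun x => -x)) := by
    have := pvF_neg s 0; rwa [neg_zero] at this
  have e2 : pvF 0 (s.map (fun x => x - M)) = pvF 0 ((s.map (fun x => x - M)).map (fun x => -x)) := by
    have := pvF_neg (s.map (fun x => x - M)) 0; rwa [neg_zero] at this
  rw [e1, e2]
  have key := pvF_pos_shift (s.map (fun x => -x)) (-M) (by simpa using hne) (by omega)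
    (by intro y hy; obtain ⟨x, hx, rfl⟩ := List.mem_map.mp hy; have := hall x hx; omega)
  rw [key]
  have : (s.map (fun x => -x)).map (fun x => x - -M) = (s.map (fun x => x - M)).map (fun x => -x) := by
    simp only [List.map_map]
    apply List.map_congr_left
    intro x _
    simp; ring
  rw [this]

lemma pvSp_of_mixed (t : List Int) : ∀ a : Int, t ≠ [] →
    (∃ x, (x = a ∨ x ∈ t) ∧ x ≤ 0) → (∃ y, (y = a ∨ y ∈ t) ∧ 0 ≤ y) → pvSp a t := by
  induction t with
  | nil => intro a h; exact absurd rfl h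
  | cons b t' ih =>
    intro a _ hx hy
    obtain ⟨x, hxm, hxle⟩ := hx
    obtain ⟨y, hym, hyge⟩ := hy
    show a * b ≤ 0 ∨ pvSp b t'
    by_cases hab : a * b ≤ 0
    · exact Or.inl hab
    · right
      have hpos : 0 < a * b := lt_of_not_ge hab
      rcases lt_trichotomy a 0 with ha | ha | ha
      · -- a < 0, so b < 0
        have hb : b < 0 := by nlinarith
        have hyt : y ∈ t' := by
          rcases hym with rfl | hym
          · omega
          · rcases List.mem_cons.mp hym with rfl | h'
            · omega
            · exact h'
        exact ih b (List.ne_nil_of_mem hyt)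
          ⟨b, Or.inl rfl, hb.le⟩ ⟨y, Or.inr hyt, hyge⟩
      · exact absurd hab (by simp [ha])
      · -- a > 0, so b > 0
        have hb : 0 < b := by nlinarith
        have hxt : x ∈ t' := by
          rcases hxm with rfl | hxm
          · omega
          · rcases List.mem_cons.mp hxm with rfl | h'
            · omega
            · exact h'
        exact ih b (List.ne_nil_of_mem hxt)
          ⟨x, Or.inr hxt, hxle⟩ ⟨b, Or.inl rfl, hb.le⟩

lemma loop_inv (fuel : Nat)
    (IH : ∀ t : List Int, t ≠ [] → t.length ≤ fuel → goA fuel t = pvF 0 t) :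
    ∀ (rest : List Int) (res : Int) (r : List Int), r ≠ [] →
    ((pvSp (r.getLastD 0) rest ∧ r.length + rest.length ≤ fuel + 1) ∨ r.length + rest.length ≤ fuel) →
    (rest.foldl
       (fun (st : Int × List Int) si =>
         if st.2.getLastD 0 * si ≤ 0 then (st.1 + goA fuel st.2, [si])
         else (st.1, st.2 ++ [si])) (res, r)).1
      + goA fuel (rest.foldl
       (fun (st : Int × List Int) si =>
         if st.2.getLastD 0 * si ≤ 0 then (st.1 + goA fuel st.2, [si])
         else (st.1, st.2 ++ [si])) (res, r)).2
      = res + pvF 0 (r ++ rest) := by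
  intro rest
  induction rest with
  | nil =>
    intro res r hr hinv
    have hlen : r.length ≤ fuel := by
      rcases hinv with ⟨hsp, _⟩ | h
      · simp [pvSp] at hsp
      · simpa using h
    simp only [List.foldl_nil, List.append_nil]
    rw [IH r hr hlen]
  | cons si rest' ih =>
    intro res r hr hinv
    have hr1 : 0 < r.length := List.length_pos_iff.mpr hr
    by_cases hs : r.getLastD 0 * si ≤ 0
    · simp only [List.foldl_cons, if_pos hs]
      have hrfuel : r.length ≤ fuel := by
        rcases hinv with ⟨_, h⟩ | h <;> simp at h <;> omega
      rw [ih (res + goA fuel r) [si] (by simp)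
        (Or.inr (by rcases hinv with ⟨_, h⟩ | h <;> simp at h ⊢ <;> omega))]
      rw [IH r hr hrfuel, pvF_append r 0 (si :: rest'), pvF_reset _ si rest' hs]
      simp only [List.singleton_append]
      ring
    · simp only [List.foldl_cons, if_neg hs]
      have hlast : (r ++ [si]).getLastD 0 = si := by
        rw [List.getLastD_eq_getLast?, List.getLast?_append]
        simp
      have hinv' : (pvSp ((r ++ [si]).getLastD 0) rest' ∧
          (r ++ [si]).length + rest'.length ≤ fuel + 1) ∨
          (r ++ [si]).length + rest'.length ≤ fuel := by
        rcases hinv with ⟨hsp, h⟩ | h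
        · left
          refine ⟨?_, by simp at h ⊢; omega⟩
          rw [hlast]
          rcases hsp with hsp | hsp
          · exact absurd hsp hs
          · exact hsp
        · right; simp at h ⊢; omega
      rw [ih res (r ++ [si]) (by simp) hinv']
      simp [List.append_assoc]

-- members of the shifted list are exactly x - m for x in s
lemma goA_eq : ∀ (fuel : Nat) (s : List Int), s ≠ [] → s.length ≤ fuel → goA fuel s = pvF 0 s := by
  intro fuel
  induction fuel with
  | zero =>
    intro s hne hlen
    exact absurd (List.eq_nil_of_length_eq_zero (by omega)) hne
  | succ fuel ih =>
    intro s hne hlen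
    by_cases h1 : s.length = 1
    · obtain ⟨x, rfl⟩ : ∃ x, s = [x] := by
        match s, h1 with
        | [x], _ => exact ⟨x, rfl⟩
      show (if _ then _ else _) = _
      rw [if_pos h1]
      simp [pvF, pvC]
    · have hlen2 : 2 ≤ s.length := by
        have := List.length_pos_iff.mpr hne
        omega
      obtain ⟨h0, t0, rfl⟩ := List.exists_cons_of_ne_nil hne
      have ht0 : t0 ≠ [] := by
        intro h; rw [h] at hlen2; simp at hlen2
      show (if _ then _ else _) = _
      rw [if_neg h1]
      by_cases hpos : (h0 :: t0).all (fun x => decide (0 < x)) = true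
      · -- all positive: subtract the minimum
        obtain ⟨m0, hm0⟩ : ∃ m0, PySem.List.min? (h0 :: t0) (fun x => x) = some m0 :=
          Option.ne_none_iff_exists'.mp (by rw [Ne, PySem.List.min?_eq_none_iff]; exact hne)
        have hmem : m0 ∈ h0 :: t0 := PySem.List.min?_mem hm0
        have hmin : ∀ y ∈ h0 :: t0, m0 ≤ y := fun y hy => PySem.List.min?_isMin hm0 y hy
        have hm0pos : 0 < m0 := by
          have := List.all_eq_true.mp hpos m0 hmem
          simpa using this
        have hz : (0 : Int) = h0 - m0 ∨ (0 : Int) ∈ t0.map (fun x => x - m0) := by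
          have : m0 = h0 ∨ m0 ∈ t0 := List.mem_cons.mp hmem
          rcases this with h | h
          · left; omega
          · right
            exact List.mem_map.mpr ⟨m0, h, by ring⟩
        have hneg : ¬ ((((h0 - m0) :: t0.map (fun x => x - m0)).all
            (fun x => decide (x < 0))) = true) := by
          simp only [List.all_eq_true, decide_eq_true_eq]
          intro hc
          exact absurd (hc 0 (List.mem_cons.mpr hz)) (by omega)
        have hpv : pvSp (h0 - m0) (t0.map (fun x => x - m0)) :=
          pvSp_of_mixed _ _ (by simpa using ht0) ⟨0, hz, le_refl 0⟩ ⟨0, hz, le_refl 0⟩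
        simp only [hm0, Option.getD_some, if_pos hpos, List.map_cons, if_neg hneg,
          List.drop_one, List.tail_cons, List.headD_cons]
        rw [loop_inv fuel ih (t0.map (fun x => x - m0)) (0 + m0) [h0 - m0]
          (by simp)
          (Or.inl ⟨by simpa using hpv, by simp at hlen ⊢; omega⟩)]
        have hshift := pvF_pos_shift (h0 :: t0) m0 hne hm0pos hmin
        simp only [List.map_cons] at hshift
        rw [List.singleton_append, hshift]
        ring
      · by_cases hneg : (h0 :: t0).all (fun x => decide (x < 0)) = true
        · -- all negative: subtract the maximum
          obtain ⟨M0, hM0⟩ : ∃ M0, PySem.List.max? (h0 :: t0) (fun x => x) = some M0 :=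
            Option.ne_none_iff_exists'.mp (by rw [Ne, PySem.List.max?_eq_none_iff]; exact hne)
          have hmem : M0 ∈ h0 :: t0 := PySem.List.max?_mem hM0
          have hmax : ∀ y ∈ h0 :: t0, y ≤ M0 := fun y hy => PySem.List.max?_isMax hM0 y hy
          have hM0neg : M0 < 0 := by
            have := List.all_eq_true.mp hneg M0 hmem
            simpa using this
          have hz : (0 : Int) = h0 - M0 ∨ (0 : Int) ∈ t0.map (fun x => x - M0) := by
            have : M0 = h0 ∨ M0 ∈ t0 := List.mem_cons.mp hmem
            rcases this with h | h
            · left; omega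
            · right
              exact List.mem_map.mpr ⟨M0, h, by ring⟩
          have hpv : pvSp (h0 - M0) (t0.map (fun x => x - M0)) :=
            pvSp_of_mixed _ _ (by simpa using ht0) ⟨0, hz, le_refl 0⟩ ⟨0, hz, le_refl 0⟩
          simp only [hM0, Option.getD_some, if_neg hpos, if_pos hneg, List.map_cons,
            List.drop_one, List.tail_cons, List.headD_cons]
          rw [loop_inv fuel ih (t0.map (fun x => x - M0)) (0 + -M0) [h0 - M0]
            (by simp)
            (Or.inl ⟨by simpa using hpv, by simp at hlen ⊢; omega⟩)]
          have hshift := pvF_neg_shift (h0 :: t0) M0 hne hM0neg hmax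
          simp only [List.map_cons] at hshift
          rw [List.singleton_append, hshift]
          ring
        · -- mixed signs already
          have hx : ∃ x, (x = h0 ∨ x ∈ t0) ∧ x ≤ 0 := by
            simp only [List.all_eq_true, decide_eq_true_eq] at hpos
            push Not at hpos
            obtain ⟨x, hxm, hx0⟩ := hpos
            exact ⟨x, List.mem_cons.mp hxm, by omega⟩
          have hy : ∃ y, (y = h0 ∨ y ∈ t0) ∧ 0 ≤ y := by
            simp only [List.all_eq_true, decide_eq_true_eq] at hneg
            push Not at hneg
            obtain ⟨y, hym, hy0⟩ := hneg
            exact ⟨y, List.mem_cons.mp hym, by omega⟩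
          have hpv : pvSp h0 t0 := pvSp_of_mixed _ _ ht0 hx hy
          simp only [if_neg hpos, if_neg hneg, List.drop_one, List.tail_cons, List.headD_cons]
          rw [loop_inv fuel ih t0 0 [h0] (by simp)
            (Or.inl ⟨by simpa using hpv, by simp at hlen ⊢; omega⟩)]
          rw [List.singleton_append]
          ring

-- ===== VERDICT (by name: the statement is the Claim_ definition above) =====
theorem min_cmds_spec : Claim_equal_min_cmds := by
  intro s _ hpre
  unfold Spec_min_cmds min_cmds
  rw [alt_eq_pvF, goA_eq s.length s hpre le_rfl]
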